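-- pv_equiv track=rewrite | github.com/cmdouglas/toy_roguelike | rl/objects/obstacles/smoothwall.py | r_rotate
-- ===== SOURCE A (Python) =====
-- def r_rotate(dirs):
--     dirtrans = {
--         'n': 'e',
--         'ne': 'se',
--         'e': 's',
--         'se': 'sw',
--         's': 'w',
--         'sw': 'nw',
--         'w': 'n',
--         'nw': 'ne'
--     }
--
--     return [dirtrans[d] for d in dirs]
-- ===== SOURCE B (Python) =====
-- _CHAR_ROT = {'n': 'e', 'e': 's', 's': 'w', 'w': 'n'}
--
-- def r_rotate(dirs):
--     # Rotate each component letter 90 deg clockwise (4-cycle n->e->s->w->n),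
--     # then normalize diagonals: the vertical letter (n/s) comes first.
--     out = []
--     for d in dirs:
--         r = ''.join(_CHAR_ROT[c] for c in d)
--         if len(r) == 2 and r[0] in 'ew':
--             r = r[1] + r[0]
--         out.append(r)
--     return out
-- ===== Notes on version B (the rewrite author's own statement) =====
-- stated objective: alternative
-- what changed: Instead of an 8-entry direction-to-direction table, B decomposes each label into its component compass letters, rotates each letter through the 4-cycle n->e->s->w->n, and re-normalizes diagonals so the vertical letter comes first.
import Mathlib
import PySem

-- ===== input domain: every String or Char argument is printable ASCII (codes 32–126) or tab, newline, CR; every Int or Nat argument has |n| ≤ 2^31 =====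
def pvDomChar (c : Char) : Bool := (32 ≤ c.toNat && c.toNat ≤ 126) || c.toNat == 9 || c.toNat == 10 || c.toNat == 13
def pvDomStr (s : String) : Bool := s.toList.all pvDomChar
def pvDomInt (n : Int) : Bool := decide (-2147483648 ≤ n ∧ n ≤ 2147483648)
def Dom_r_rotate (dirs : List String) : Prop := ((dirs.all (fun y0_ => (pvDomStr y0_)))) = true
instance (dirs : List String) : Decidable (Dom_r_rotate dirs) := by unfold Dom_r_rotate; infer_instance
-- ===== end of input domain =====

-- B rotates each component compass letter through the 4-cycle n->e->s->w->n and renormalizes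
-- diagonals (vertical letter first) instead of A's explicit 8-entry transition table (alternative).


-- ===== PORT A =====
-- A's 8-entry dict; dirtrans[d] raises KeyError on a missing key (excluded by Pre_),
-- so the port uses Dict.get? with a default that Pre_ makes unreachable.
def pvDirtrans : PySem.Dict String String :=
  (((((((PySem.Dict.empty.insert "n" "e").insert "ne" "se").insert "e" "s").insert
      "se" "sw").insert "s" "w").insert "sw" "nw").insert "w" "n").insert "nw" "ne"

def r_rotate (dirs : List String) : List String :=
  dirs.map (fun d => (pvDirtrans.get? d).getD "")

-- ===== PORT B =====
-- _CHAR_ROT[c] raises KeyError on a char outside n/e/s/w (excluded by Pre_); default ' ' unreachable there.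
def pvCharRot (c : Char) : Char :=
  ((((((PySem.Dict.empty.insert 'n' 'e').insert 'e' 's').insert 's' 'w').insert 'w' 'n').get? c)).getD ' '

def pvRotOne (d : String) : String :=
  let r := d.toList.map pvCharRot
  if r.length = 2 ∧ PySem.List.pyGetD r 0 ' ' ∈ ['e', 'w'] then
    String.ofList [PySem.List.pyGetD r 1 ' ', PySem.List.pyGetD r 0 ' ']
  else String.ofList r

-- Source B's loop appending to out
def r_rotate_alt (dirs : List String) : List String :=
  dirs.foldl (fun out d => out ++ [pvRotOne d]) []

-- ===== PRECONDITION & SPEC =====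
-- Pre_ = exactly the inputs on which A returns: every element is one of the 8 direction
-- labels (on anything else A raises KeyError).
def Pre_r_rotate (dirs : List String) : Prop :=
  ∀ d ∈ dirs, d ∈ ["n", "ne", "e", "se", "s", "sw", "w", "nw"]
instance (dirs : List String) : Decidable (Pre_r_rotate dirs) := by unfold Pre_r_rotate; infer_instance

def pvWitness_r_rotate : List String := ["sw", "n", "n", "e"]

def Spec_r_rotate (dirs : List String) (out : List String) : Prop := out = r_rotate_alt dirs
instance (dirs : List String) (out : List String) : Decidable (Spec_r_rotate dirs out) := by unfold Spec_r_rotate; infer_instance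

-- ===== CLAIM (what is proved, stated in full; the proofs are below) =====
def Claim_equal_r_rotate : Prop := ∀ (dirs : List String), Dom_r_rotate dirs → Pre_r_rotate dirs → Spec_r_rotate dirs (r_rotate dirs)

-- ===== LEMMAS AND PROOFS =====
-- B's append-to-accumulator loop is a map.
theorem pv_alt_map (dirs : List String) : r_rotate_alt dirs = dirs.map pvRotOne := by
  unfold r_rotate_alt
  induction dirs using List.reverseRecOn with
  | nil => rfl
  | append_singleton xs x ih => simp [ih]

-- On each of the 8 labels the two per-element functions agree.
theorem pv_step_eq (d : String) (hd : d ∈ ["n", "ne", "e", "se", "s", "sw", "w", "nw"]) :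
    (pvDirtrans.get? d).getD "" = pvRotOne d := by
  fin_cases hd <;> decide

-- ===== VERDICT (by name: the statement is the Claim_ definition above) =====
theorem r_rotate_spec : Claim_equal_r_rotate := by
  intro dirs _ hpre
  unfold Spec_r_rotate r_rotate
  rw [pv_alt_map]
  exact List.map_congr_left (fun d hd => pv_step_eq d (hpre d hd))
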